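-- pv_equiv track=rewrite | github.com/BenMarks-Projects-Account/Market_Analysis_Backend | BenTrade/backend/tests/test_debit_data_pipeline.py | _count_missing
-- ===== SOURCE A (Python) =====
-- def _count_missing(enriched: list[dict]) -> dict[str, int]:
--     """Mirror strategy_service.py missing_field_counts logic."""
--     mfc_bid = 0
--     mfc_ask = 0
--     mfc_any_leg = 0
--     mfc_pop = 0
--     mfc_oi = 0
--     for row in enriched:
--         _sb = row.get("_short_bid")
--         _la = row.get("_long_ask")
--         _sa = row.get("_short_ask")
--         _lb = row.get("_long_bid")
--         # Legacy counters
--         if _sb is None and row.get("bid") is None: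
--             mfc_bid += 1
--         if _la is None and row.get("ask") is None:
--             mfc_ask += 1
--         # Aggregate
--         if _sb is None or _sa is None or _lb is None or _la is None:
--             mfc_any_leg += 1
--         # POP
--         if row.get("p_win_used") is None and row.get("pop_delta_approx") is None:
--             mfc_pop += 1
--         # OI
--         if row.get("open_interest") is None:
--             mfc_oi += 1
--     return {
--         "missing_bid": mfc_bid,
--         "missing_ask": mfc_ask,
--         "any_leg_quote_missing": mfc_any_leg,
--         "missing_pop": mfc_pop,
--         "missing_oi": mfc_oi,
--     }
-- ===== SOURCE B (Python) =====
-- def _count_missing(enriched: list[dict]) -> dict[str, int]: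
--     """Mirror strategy_service.py missing_field_counts logic."""
--     return {
--         "missing_bid": sum(1 for row in enriched
--                            if row.get("_short_bid") is None and row.get("bid") is None),
--         "missing_ask": sum(1 for row in enriched
--                            if row.get("_long_ask") is None and row.get("ask") is None),
--         "any_leg_quote_missing": sum(1 for row in enriched
--                                      if row.get("_short_bid") is None or row.get("_short_ask") is None
--                                      or row.get("_long_bid") is None or row.get("_long_ask") is None),
--         "missing_pop": sum(1 for row in enriched
--                            if row.get("p_win_used") is None and row.get("pop_delta_approx") is None),
--         "missing_oi": sum(1 for row in enriched if row.get("open_interest") is None),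
--     }
-- ===== Notes on version B (the rewrite author's own statement) =====
-- stated objective: idiomatic
-- what changed: Replaces the single loop that threads five counter variables with a direct dict literal of five independent generator-expression counts, one scan per output key.
import Mathlib
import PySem

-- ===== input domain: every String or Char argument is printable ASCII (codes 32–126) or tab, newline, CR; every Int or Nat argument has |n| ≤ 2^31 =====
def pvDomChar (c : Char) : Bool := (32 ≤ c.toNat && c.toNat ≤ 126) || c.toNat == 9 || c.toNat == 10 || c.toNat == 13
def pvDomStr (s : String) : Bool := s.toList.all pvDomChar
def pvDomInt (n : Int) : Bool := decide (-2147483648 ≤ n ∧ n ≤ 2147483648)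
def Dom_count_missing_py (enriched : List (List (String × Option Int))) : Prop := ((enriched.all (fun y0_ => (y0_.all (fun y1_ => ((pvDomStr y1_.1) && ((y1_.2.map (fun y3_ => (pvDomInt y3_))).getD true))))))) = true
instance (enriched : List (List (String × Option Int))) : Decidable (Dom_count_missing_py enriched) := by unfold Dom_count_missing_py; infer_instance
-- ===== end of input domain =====

-- B replaces A's single five-counter loop with five independent one-pass counts (idiomatic decomposition; same cost).
-- ===== PORT A =====
-- row.get(k) is None: first-match lookup returns Python None iff the key is absent or mapped to None
def pvRowIsNone (row : List (String × Option Int)) (k : String) : Bool :=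
  (((PySem.Dict.mk row).get? k).join).isNone

def count_missing_py (enriched : List (List (String × Option Int))) : List (String × Int) :=
  let s := enriched.foldl
    (fun (s : Int × Int × Int × Int × Int) row =>
      let sb := pvRowIsNone row "_short_bid"
      let la := pvRowIsNone row "_long_ask"
      let sa := pvRowIsNone row "_short_ask"
      let lb := pvRowIsNone row "_long_bid"
      let b := if sb && pvRowIsNone row "bid" then s.1 + 1 else s.1
      let a := if la && pvRowIsNone row "ask" then s.2.1 + 1 else s.2.1
      let l := if sb || sa || lb || la then s.2.2.1 + 1 else s.2.2.1
      let p := if pvRowIsNone row "p_win_used" && pvRowIsNone row "pop_delta_approx" then s.2.2.2.1 + 1 else s.2.2.2.1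
      let o := if pvRowIsNone row "open_interest" then s.2.2.2.2 + 1 else s.2.2.2.2
      (b, a, l, p, o))
    (0, 0, 0, 0, 0)
  [("missing_bid", s.1), ("missing_ask", s.2.1), ("any_leg_quote_missing", s.2.2.1),
   ("missing_pop", s.2.2.2.1), ("missing_oi", s.2.2.2.2)]

-- ===== PORT B =====
def count_missing_py_alt (enriched : List (List (String × Option Int))) : List (String × Int) :=
  [("missing_bid", (enriched.countP (fun row => pvRowIsNone row "_short_bid" && pvRowIsNone row "bid") : Int)),
   ("missing_ask", (enriched.countP (fun row => pvRowIsNone row "_long_ask" && pvRowIsNone row "ask") : Int)),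
   ("any_leg_quote_missing", (enriched.countP (fun row => pvRowIsNone row "_short_bid" || pvRowIsNone row "_short_ask" || pvRowIsNone row "_long_bid" || pvRowIsNone row "_long_ask") : Int)),
   ("missing_pop", (enriched.countP (fun row => pvRowIsNone row "p_win_used" && pvRowIsNone row "pop_delta_approx") : Int)),
   ("missing_oi", (enriched.countP (fun row => pvRowIsNone row "open_interest") : Int))]

-- ===== PRECONDITION & SPEC =====
def Spec_count_missing_py (enriched : List (List (String × Option Int))) (out : List (String × Int)) : Prop := out = count_missing_py_alt enriched
instance (enriched : List (List (String × Option Int))) (out : List (String × Int)) : Decidable (Spec_count_missing_py enriched out) := by unfold Spec_count_missing_py; infer_instance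

-- ===== CLAIM (what is proved, stated in full; the proofs are below) =====
def Claim_equal_count_missing_py : Prop := ∀ (enriched : List (List (String × Option Int))), Dom_count_missing_py enriched → Spec_count_missing_py enriched (count_missing_py enriched)

-- ===== LEMMAS AND PROOFS =====

-- ===== VERDICT (by name: the statement is the Claim_ definition above) =====
theorem pvFold_eq_counts (l : List (List (String × Option Int))) (s0 : Int × Int × Int × Int × Int) :
    l.foldl
      (fun (s : Int × Int × Int × Int × Int) row =>
        let sb := pvRowIsNone row "_short_bid"
        let la := pvRowIsNone row "_long_ask"
        let sa := pvRowIsNone row "_short_ask"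
        let lb := pvRowIsNone row "_long_bid"
        let b := if sb && pvRowIsNone row "bid" then s.1 + 1 else s.1
        let a := if la && pvRowIsNone row "ask" then s.2.1 + 1 else s.2.1
        let l := if sb || sa || lb || la then s.2.2.1 + 1 else s.2.2.1
        let p := if pvRowIsNone row "p_win_used" && pvRowIsNone row "pop_delta_approx" then s.2.2.2.1 + 1 else s.2.2.2.1
        let o := if pvRowIsNone row "open_interest" then s.2.2.2.2 + 1 else s.2.2.2.2
        (b, a, l, p, o)) s0
    = (s0.1 + (l.countP (fun row => pvRowIsNone row "_short_bid" && pvRowIsNone row "bid") : Int),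
       s0.2.1 + (l.countP (fun row => pvRowIsNone row "_long_ask" && pvRowIsNone row "ask") : Int),
       s0.2.2.1 + (l.countP (fun row => pvRowIsNone row "_short_bid" || pvRowIsNone row "_short_ask" || pvRowIsNone row "_long_bid" || pvRowIsNone row "_long_ask") : Int),
       s0.2.2.2.1 + (l.countP (fun row => pvRowIsNone row "p_win_used" && pvRowIsNone row "pop_delta_approx") : Int),
       s0.2.2.2.2 + (l.countP (fun row => pvRowIsNone row "open_interest") : Int)) := by
  induction l generalizing s0 with
  | nil => simp
  | cons r t ih =>
    simp only [List.foldl_cons, ih, List.countP_cons, Prod.mk.injEq]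
    refine ⟨?_, ?_, ?_, ?_, ?_⟩ <;> push_cast <;> split_ifs <;> omega

-- ===== VERDICT (by name: the statement is the Claim_ definition above) =====
theorem count_missing_py_spec : Claim_equal_count_missing_py := by
  intro enriched _
  show _ = _
  simp only [count_missing_py, count_missing_py_alt, pvFold_eq_counts]
  norm_num
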